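-- pv_equiv track=rewrite | github.com/ZAIN-DEV369/Password-Strength-Meter-and-Generator | password_meter.py | is_sequential
-- ===== SOURCE A (Python) =====
-- def is_sequential(s):
--     s = s.lower()
--     if len(s) < 4:
--         return False
--     delta = ord(s[1]) - ord(s[0])
--     if abs(delta) != 1:
--         return False
--     for i in range(2, len(s)):
--         if ord(s[i]) - ord(s[i-1]) != delta:
--             return False
--     return True
-- ===== SOURCE B (Python) =====
-- def is_sequential(s):
--     s = s.lower()
--     if len(s) < 4:
--         return False
--     delta = ord(s[1]) - ord(s[0])
--     if abs(delta) != 1: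
--         return False
--     codes = [ord(c) for c in s]
--     expected = [codes[0] + i * delta for i in range(len(s))]
--     return codes == expected
-- ===== Notes on version B (the rewrite author's own statement) =====
-- stated objective: alternative
-- what changed: Instead of A's early-exit loop verifying each consecutive delta, B constructs the full expected arithmetic progression of character codes and compares it to the string's codes by list equality.
import Mathlib
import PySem

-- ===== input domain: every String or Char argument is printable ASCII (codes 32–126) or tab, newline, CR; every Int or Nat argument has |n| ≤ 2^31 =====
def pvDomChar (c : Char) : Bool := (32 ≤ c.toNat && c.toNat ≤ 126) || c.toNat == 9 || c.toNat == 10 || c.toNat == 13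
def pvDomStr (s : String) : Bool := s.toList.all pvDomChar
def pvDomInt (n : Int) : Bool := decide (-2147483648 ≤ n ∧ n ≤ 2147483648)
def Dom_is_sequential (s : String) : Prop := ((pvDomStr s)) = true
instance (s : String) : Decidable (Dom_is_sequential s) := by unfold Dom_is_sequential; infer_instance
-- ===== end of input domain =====

-- B replaces A's early-exit per-character delta loop by constructing the expected
-- arithmetic progression of character codes and comparing lists (alternative decomposition, same cost).


-- Python's ord on a character
def pyOrd (c : Char) : Int := (c.toNat : Int)

-- ===== PORT A =====
-- A's loop: for i in range(i0, len(l)): if ord(l[i]) - ord(l[i-1]) != delta: return False; return True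
def loopA (l : List Char) (delta : Int) (i : Nat) : Bool :=
  if _h : i < l.length then
    if pyOrd l[i]! - pyOrd l[i-1]! ≠ delta then false
    else loopA l delta (i+1)
  else true
termination_by l.length - i
decreasing_by omega

def is_sequential (s : String) : Bool :=
  let l := (PySem.Str.lower s).toList
  if l.length < 4 then false
  else
    let delta : Int := pyOrd l[1]! - pyOrd l[0]!
    if delta.natAbs ≠ 1 then false
    else loopA l delta 2

-- ===== PORT B =====
def is_sequential_alt (s : String) : Bool :=
  let l := (PySem.Str.lower s).toList
  if l.length < 4 then false
  else
    let delta : Int := pyOrd l[1]! - pyOrd l[0]!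
    if delta.natAbs ≠ 1 then false
    else
      let codes := l.map pyOrd
      let expected := (List.range l.length).map (fun (i : Nat) => pyOrd l[0]! + (i : Int) * delta)
      codes == expected

-- ===== PRECONDITION & SPEC =====
def Spec_is_sequential (s : String) (out : Bool) : Prop := out = is_sequential_alt s
instance (s : String) (out : Bool) : Decidable (Spec_is_sequential s out) := by unfold Spec_is_sequential; infer_instance

-- ===== CLAIM (what is proved, stated in full; the proofs are below) =====
def Claim_equal_is_sequential : Prop := ∀ (s : String), Dom_is_sequential s → Spec_is_sequential s (is_sequential s)

-- ===== LEMMAS AND PROOFS =====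

theorem loopA_iff (l : List Char) (delta : Int) (j : Nat) :
    loopA l delta j = true ↔ ∀ i, j ≤ i → i < l.length → pyOrd l[i]! - pyOrd l[i-1]! = delta := by
  fun_induction loopA l delta j with
  | case1 i h hne =>
      simp only [Bool.false_eq_true, false_iff]
      intro hall; exact hne (hall i (le_refl i) h)
  | case2 i h hne ih =>
      constructor
      · intro hl k hk hk2
        rcases Nat.eq_or_lt_of_le hk with rfl | hlt
        · simpa using hne
        · exact (ih.mp hl) k hlt hk2
      · intro hall; exact ih.mpr (fun k hk hk2 => hall k (le_of_lt hk) hk2)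
  | case3 i h => simp; intro k hk hk2; omega

theorem bang_eq (l : List Char) (i : Nat) (h : i < l.length) : l[i]! = l[i] := by
  simp [getElem!_def, List.getElem?_eq_getElem h]

theorem listeq_iff (l : List Char) (c0 delta : Int) :
    ((l.map pyOrd) == (List.range l.length).map (fun (i : Nat) => c0 + (i : Int) * delta)) = true ↔
      ∀ i, (h : i < l.length) → pyOrd l[i] = c0 + (i : Int) * delta := by
  rw [beq_iff_eq]
  constructor
  · intro he i h
    have h1 : i < (l.map pyOrd).length := by simpa using h
    have := List.getElem_of_eq he h1
    rw [List.getElem_map, List.getElem_map, List.getElem_range] at this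
    exact this
  · intro hall
    apply List.ext_getElem (by simp)
    intro i h1 h2
    rw [List.getElem_map, List.getElem_map, List.getElem_range]
    exact hall i (by simpa using h1)

theorem core_iff (l : List Char) (h4 : 4 ≤ l.length) :
    (∀ i, 2 ≤ i → i < l.length → pyOrd l[i]! - pyOrd l[i-1]! = pyOrd l[1]! - pyOrd l[0]!) ↔
      (∀ i, (h : i < l.length) → pyOrd l[i] = pyOrd l[0]! + (i : Int) * (pyOrd l[1]! - pyOrd l[0]!)) := by
  set delta := pyOrd l[1]! - pyOrd l[0]! with hdel
  constructor
  · intro hstep i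
    induction i with
    | zero => intro h; simp [bang_eq l 0 (by omega)]
    | succ j ih =>
      intro h
      have hj := ih (by omega)
      rcases Nat.eq_or_lt_of_le (Nat.one_le_iff_ne_zero.mpr (Nat.succ_ne_zero j) : 1 ≤ j+1) with h1 | h1
      · have : j = 0 := by omega
        subst this
        simp [bang_eq l 1 (by omega), bang_eq l 0 (by omega), hdel]
      · have hs := hstep (j+1) (by omega) h
        have hjj : pyOrd l[j+1-1]! = pyOrd l[j] := by
          simp only [Nat.add_sub_cancel]
          rw [bang_eq l j (by omega)]
        have hji : pyOrd l[j+1]! = pyOrd l[j+1] := by rw [bang_eq l (j+1) h]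
        rw [hjj, hji, hj] at hs
        have : pyOrd l[j+1] = pyOrd l[0]! + (j:Int) * delta + delta := by omega
        rw [this]; push_cast; ring
  · intro hall i h2 hlt
    have e1 := hall i hlt
    have e2 := hall (i-1) (by omega)
    have hi : pyOrd l[i]! = pyOrd l[i] := by rw [bang_eq l i hlt]
    have hi1 : pyOrd l[i-1]! = pyOrd l[i-1] := by rw [bang_eq l (i-1) (by omega)]
    rw [hi, hi1, e1, e2]
    have hc : ((i-1 : Nat) : Int) = (i : Int) - 1 := by omega
    rw [hc]; ring

-- ===== VERDICT (by name: the statement is the Claim_ definition above) =====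
theorem is_sequential_spec : Claim_equal_is_sequential := by
  intro s _
  unfold Spec_is_sequential is_sequential is_sequential_alt
  set l := (PySem.Str.lower s).toList with hl
  by_cases h4 : l.length < 4
  · simp [h4]
  · simp only [h4, if_false]
    split_ifs with hδ
    · rfl
    · have hbools : (loopA l (pyOrd l[1]! - pyOrd l[0]!) 2 = true) ↔
          ((l.map pyOrd == (List.range l.length).map
            (fun (i : Nat) => pyOrd l[0]! + (i : Int) * (pyOrd l[1]! - pyOrd l[0]!))) = true) := by
        rw [loopA_iff, listeq_iff]
        exact core_iff l (by omega)
      cases hA : loopA l (pyOrd l[1]! - pyOrd l[0]!) 2 <;>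
        cases hB : (l.map pyOrd == (List.range l.length).map
            (fun (i : Nat) => pyOrd l[0]! + (i : Int) * (pyOrd l[1]! - pyOrd l[0]!))) <;>
        simp_all
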